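-- pv_equiv track=rewrite | github.com/XerxesZorgon/World-Energy-Review-2025 | append_updates.py | _slugify_table_name
-- ===== SOURCE A (Python) =====
-- def _slugify_table_name(name: str) -> str:
--     cleaned = name.strip().replace("/", "_").replace("\\", "_")
--     cleaned = cleaned.replace(" ", "_")
--     sanitized = "".join(ch if ch.isalnum() or ch == "_" else "_" for ch in cleaned)
--     while "__" in sanitized:
--         sanitized = sanitized.replace("__", "_")
--     sanitized = sanitized.strip("_")
--     return sanitized or "Sheet"
-- ===== SOURCE B (Python) =====
-- def _slugify_table_name(name: str) -> str:
--     # One left-to-right pass: keep alnum chars, emit a single '_' per run of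
--     # anything else (tracked with prev_us), then trim edge underscores.
--     out = []
--     prev_us = False
--     for ch in name.strip():
--         if ch.isalnum():
--             out.append(ch)
--             prev_us = False
--         elif not prev_us:
--             out.append("_")
--             prev_us = True
--     slug = "".join(out).strip("_")
--     return slug or "Sheet"
-- ===== Notes on version B (the rewrite author's own statement) =====
-- stated objective: alternative
-- what changed: Replaces A's three whole-string replace() passes, a character-map pass and a repeated replace('__','_') fixpoint loop by a single left-to-right state-machine pass that keeps alnum chars and emits one '_' per run of anything else, then trims edge underscores.
import Mathlib
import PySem

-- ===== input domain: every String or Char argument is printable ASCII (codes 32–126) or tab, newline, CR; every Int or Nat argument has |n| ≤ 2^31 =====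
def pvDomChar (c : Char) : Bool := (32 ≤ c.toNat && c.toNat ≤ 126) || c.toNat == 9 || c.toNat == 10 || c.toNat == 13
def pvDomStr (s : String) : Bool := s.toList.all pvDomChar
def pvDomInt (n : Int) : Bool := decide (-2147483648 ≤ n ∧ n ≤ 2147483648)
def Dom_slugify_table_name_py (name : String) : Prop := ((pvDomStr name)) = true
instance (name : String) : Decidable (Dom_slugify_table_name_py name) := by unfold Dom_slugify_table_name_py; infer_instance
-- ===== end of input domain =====

-- B replaces A's repeated whole-string replace passes by one state-machine pass; return value only, no mutation.

-- ===== PORT A =====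
-- The helpers below exist only to justify termination of A's `while "__" in sanitized` loop:
-- pvRep2 is a non-accumulator rendering of replace(s, "__", "_"), pvHasDD of `"__" in s`.
def pvRep2 : List Char → List Char
  | [] => []
  | [c] => [c]
  | a :: b :: t => if a = '_' ∧ b = '_' then '_' :: pvRep2 t else a :: pvRep2 (b :: t)

def pvHasDD : List Char → Bool
  | a :: b :: t => (a == '_' && b == '_') || pvHasDD (b :: t)
  | _ => false

theorem pvGo_dd (fuel : Nat) (l acc : List Char) (h : l.length ≤ fuel) :
    PySem.Chars.replace.go ['_', '_'] ['_'] fuel l acc = acc.reverse ++ pvRep2 l := by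
  induction fuel generalizing l acc with
  | zero =>
    have : l = [] := by cases l <;> simp_all
    subst this
    simp [PySem.Chars.replace.go, pvRep2]
  | succ n ih =>
    match l with
    | [] => simp [PySem.Chars.replace.go, pvRep2]
    | [c] =>
      have hpre : List.isPrefixOf ['_', '_'] [c] = false := by
        simp [List.isPrefixOf]
      simp only [PySem.Chars.replace.go, hpre, Bool.false_eq_true, if_neg]
      rw [ih [] (c :: acc) (by simp)]
      simp [pvRep2]
    | a :: b :: t =>
      by_cases hab : a = '_' ∧ b = '_'
      · obtain ⟨ha, hb⟩ := hab
        subst ha; subst hb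
        have hpre : List.isPrefixOf ['_', '_'] ('_' :: '_' :: t) = true := by
          simp [List.isPrefixOf]
        simp only [PySem.Chars.replace.go, hpre, if_pos]
        rw [show List.drop ['_', '_'].length ('_' :: '_' :: t) = t by simp,
          show ['_'].reverse ++ acc = '_' :: acc by simp]
        rw [ih t ('_' :: acc) (by simp at h ⊢; omega)]
        simp [pvRep2]
      · have hpre : List.isPrefixOf ['_', '_'] (a :: b :: t) = false := by
          simp [List.isPrefixOf]
          intro ha hb; exact hab ⟨ha.symm, hb.symm⟩
        simp only [PySem.Chars.replace.go, hpre, Bool.false_eq_true, if_neg]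
        rw [ih (b :: t) (a :: acc) (by simp at h ⊢; omega)]
        simp [pvRep2, hab]

theorem pvReplace_dd (s : List Char) :
    PySem.Chars.replace s ['_', '_'] ['_'] = pvRep2 s := by
  have : PySem.Chars.replace s ['_', '_'] ['_']
      = PySem.Chars.replace.go ['_', '_'] ['_'] s.length s [] := by
    simp [PySem.Chars.replace]
  rw [this, pvGo_dd s.length s [] (le_refl _)]
  simp

theorem pvRep2_length_le (s : List Char) : (pvRep2 s).length ≤ s.length := by
  induction s using pvRep2.induct with
  | case1 => simp [pvRep2]
  | case2 c => simp [pvRep2]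
  | case3 a b t hab ih => simp [pvRep2, hab]; omega
  | case4 a b t hab ih => simp [pvRep2, hab]; simp at ih; omega

theorem pvRep2_length_lt (s : List Char) (h : pvHasDD s = true) :
    (pvRep2 s).length < s.length := by
  induction s using pvRep2.induct with
  | case1 => simp [pvHasDD] at h
  | case2 c => simp [pvHasDD] at h
  | case3 a b t hab ih =>
    have := pvRep2_length_le t
    simp [pvRep2, hab]; omega
  | case4 a b t hab ih =>
    have hdd : pvHasDD (b :: t) = true := by
      simp [pvHasDD] at h
      rcases h with ⟨ha, hb⟩ | h
      · exact absurd ⟨ha, hb⟩ hab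
      · exact h
    have := ih hdd
    simp [pvRep2, hab] at this ⊢
    omega

theorem pvInfix_dd : ∀ (s : List Char), (['_', '_'] <:+: s) ↔ pvHasDD s = true
  | [] => by simp [pvHasDD]
  | [c] => by
    simp only [pvHasDD]
    constructor
    · intro h
      have := h.length_le
      simp at this
    · simp
  | a :: b :: t => by
    rw [List.infix_cons_iff, pvInfix_dd (b :: t)]
    simp only [pvHasDD, Bool.or_eq_true, Bool.and_eq_true, beq_iff_eq]
    constructor
    · rintro (hpre | h)
      · left
        rw [List.cons_prefix_cons] at hpre
        obtain ⟨ha, hpre⟩ := hpre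
        rw [List.cons_prefix_cons] at hpre
        exact ⟨ha.symm, hpre.1.symm⟩
      · right; exact h
    · rintro (⟨ha, hb⟩ | h)
      · left
        subst ha; subst hb
        simp [List.cons_prefix_cons]
      · right; exact h

theorem pvIsIn_dd (s : List Char) : PySem.Chars.isIn ['_', '_'] s = pvHasDD s := by
  cases h : pvHasDD s
  · rw [PySem.Chars.isIn_eq_false_iff]
    intro hinf
    rw [pvInfix_dd s] at hinf
    simp [h] at hinf
  · rw [PySem.Chars.isIn_iff_infix, pvInfix_dd s]
    exact h

-- A's `while "__" in sanitized: sanitized = sanitized.replace("__", "_")`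
def pyCollapse (s : List Char) : List Char :=
  if h : PySem.Chars.isIn ['_', '_'] s = true then
    pyCollapse (PySem.Chars.replace s ['_', '_'] ['_'])
  else s
termination_by s.length
decreasing_by
  rw [pvReplace_dd]
  exact pvRep2_length_lt s (by rw [← pvIsIn_dd]; exact h)

def slugify_table_name_py (name : String) : String :=
  let cleaned := PySem.Chars.replace
    (PySem.Chars.replace (PySem.Chars.strip name.toList) ['/'] ['_']) ['\\'] ['_']
  let cleaned2 := PySem.Chars.replace cleaned [' '] ['_']
  -- "".join(ch if ch.isalnum() or ch == "_" else "_" for ch in cleaned): a join of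
  -- one-character strings is the mapped character list
  let sanitized := cleaned2.map (fun ch => if PySem.Chars.isalnum ch || ch == '_' then ch else '_')
  let collapsed := pyCollapse sanitized
  let stripped := PySem.Chars.stripChars collapsed ['_']
  if stripped.isEmpty then "Sheet" else String.mk stripped

-- ===== PORT B =====
-- the single pass with the prev_was_underscore flag
def bPass : List Char → Bool → List Char
  | [], _ => []
  | c :: t, prev =>
    if PySem.Chars.isalnum c then c :: bPass t false
    else if prev then bPass t true
    else '_' :: bPass t true

def slugify_table_name_py_alt (name : String) : String :=
  let slug := PySem.Chars.stripChars (bPass (PySem.Chars.strip name.toList) false) ['_']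
  if slug.isEmpty then "Sheet" else String.mk slug

-- ===== PRECONDITION & SPEC =====
def Spec_slugify_table_name_py (name : String) (out : String) : Prop := out = slugify_table_name_py_alt name
instance (name : String) (out : String) : Decidable (Spec_slugify_table_name_py name out) := by unfold Spec_slugify_table_name_py; infer_instance

-- ===== CLAIM (what is proved, stated in full; the proofs are below) =====
def Claim_equal_slugify_table_name_py : Prop := ∀ (name : String), Dom_slugify_table_name_py name → Spec_slugify_table_name_py name (slugify_table_name_py name)

-- ===== LEMMAS AND PROOFS =====

-- the fully collapsed form: every maximal run of '_' becomes a single '_'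
def pvCr : List Char → List Char
  | [] => []
  | c :: t => if c = '_' then '_' :: pvCr (t.dropWhile (· = '_')) else c :: pvCr t
termination_by s => s.length
decreasing_by
  · exact Nat.lt_succ_of_le (List.length_dropWhile_le _ _)
  · simp

def pvG (c : Char) : Char := if PySem.Chars.isalnum c then c else '_'

theorem pvCr_us (t : List Char) : pvCr ('_' :: t) = '_' :: pvCr (t.dropWhile (· = '_')) := by
  rw [pvCr]; simp

theorem pvCr_ne (c : Char) (t : List Char) (h : ¬ c = '_') : pvCr (c :: t) = c :: pvCr t := by
  rw [pvCr]; simp [h]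

theorem pvDrop_us (t : List Char) :
    List.dropWhile (· = '_') ('_' :: t) = List.dropWhile (· = '_') t := by
  simp [List.dropWhile]

theorem pvCr_no_dd (s : List Char) (h : pvHasDD s = false) : pvCr s = s := by
  induction s using pvCr.induct with
  | case1 => simp [pvCr]
  | case2 t ih =>
    have hdrop : t.dropWhile (· = '_') = t := by
      cases t with
      | nil => simp
      | cons d t' =>
        have hd : ¬ d = '_' := by
          intro hd; subst hd; simp [pvHasDD] at h
        simp [List.dropWhile, hd]
    rw [hdrop] at ih
    have ht : pvHasDD t = false := by
      cases t with
      | nil => simp [pvHasDD]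
      | cons d t' => simp [pvHasDD] at h ⊢; exact h.2
    rw [pvCr_us, hdrop, ih ht]
  | case3 c t hc ih =>
    have ht : pvHasDD t = false := by
      cases t with
      | nil => simp [pvHasDD]
      | cons d t' => simp [pvHasDD] at h ⊢; exact h.2
    rw [pvCr_ne c t hc, ih ht]

theorem pvRep2_dropWhile_ne (b : Char) (l : List Char) (hb : ¬ b = '_') :
    (pvRep2 (b :: l)).dropWhile (· = '_') = pvRep2 (b :: l) := by
  cases l with
  | nil => simp [pvRep2, List.dropWhile, hb]
  | cons c l' =>
    have : ¬ (b = '_' ∧ c = '_') := fun ⟨h1, _⟩ => hb h1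
    simp [pvRep2, this, List.dropWhile, hb]

theorem pvRep2_dropWhile (t : List Char) :
    (pvRep2 t).dropWhile (· = '_') = pvRep2 (t.dropWhile (· = '_')) := by
  induction t using pvRep2.induct with
  | case1 => simp [pvRep2]
  | case2 c =>
    by_cases hc : c = '_'
    · subst hc; simp [pvRep2, List.dropWhile]
    · simp [pvRep2, List.dropWhile, hc]
  | case3 a b t hab ih =>
    obtain ⟨ha, hb⟩ := hab
    subst ha; subst hb
    rw [show pvRep2 ('_' :: '_' :: t) = '_' :: pvRep2 t by simp [pvRep2]]
    simp only [pvDrop_us]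
    rw [ih]
  | case4 a b t hab ih =>
    by_cases ha : a = '_'
    · subst ha
      have hb : ¬ b = '_' := fun h' => hab ⟨rfl, h'⟩
      rw [show pvRep2 ('_' :: b :: t) = '_' :: pvRep2 (b :: t) by simp [pvRep2, hb]]
      simp only [pvDrop_us]
      rw [pvRep2_dropWhile_ne b t hb]
      rw [show List.dropWhile (· = '_') (b :: t) = b :: t by simp [List.dropWhile, hb]]
    · rw [show List.dropWhile (· = '_') (a :: b :: t) = a :: b :: t by
        simp [List.dropWhile, ha]]
      rw [show pvRep2 (a :: b :: t) = a :: pvRep2 (b :: t) by simp [pvRep2, hab]]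
      simp [List.dropWhile, ha]

theorem pvCr_rep2_aux : ∀ (n : Nat) (s : List Char), s.length ≤ n → pvCr (pvRep2 s) = pvCr s := by
  intro n
  induction n with
  | zero =>
    intro s h
    have : s = [] := by cases s <;> simp_all
    subst this; rfl
  | succ n ih =>
    intro s h
    match s with
    | [] => rfl
    | [c] => rfl
    | a :: b :: t =>
      simp only [List.length_cons] at h
      by_cases hab : a = '_' ∧ b = '_'
      · obtain ⟨ha, hb⟩ := hab
        subst ha; subst hb
        rw [show pvRep2 ('_' :: '_' :: t) = '_' :: pvRep2 t by simp [pvRep2]]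
        rw [pvCr_us, pvCr_us, pvRep2_dropWhile, pvDrop_us]
        rw [ih _ (le_trans (List.length_dropWhile_le _ _) (by omega))]
      · by_cases ha : a = '_'
        · subst ha
          have hb : ¬ b = '_' := fun h' => hab ⟨rfl, h'⟩
          rw [show pvRep2 ('_' :: b :: t) = '_' :: pvRep2 (b :: t) by simp [pvRep2, hb]]
          rw [pvCr_us, pvCr_us, pvRep2_dropWhile_ne b t hb]
          rw [show List.dropWhile (· = '_') (b :: t) = b :: t by simp [List.dropWhile, hb]]
          rw [ih (b :: t) (by simp; omega)]
        · rw [show pvRep2 (a :: b :: t) = a :: pvRep2 (b :: t) by simp [pvRep2, hab]]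
          rw [pvCr_ne a _ ha, pvCr_ne a _ ha, ih (b :: t) (by simp; omega)]

theorem pvCr_rep2 (s : List Char) : pvCr (pvRep2 s) = pvCr s :=
  pvCr_rep2_aux s.length s (le_refl _)

theorem pvCollapse_eq_cr_aux : ∀ (n : Nat) (s : List Char), s.length ≤ n → pyCollapse s = pvCr s := by
  intro n
  induction n with
  | zero =>
    intro s h
    have : s = [] := by cases s <;> simp_all
    subst this
    rw [pyCollapse]
    split
    · rename_i hin
      rw [pvIsIn_dd] at hin
      simp [pvHasDD] at hin
    · simp [pvCr]
  | succ n ih =>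
    intro s h
    rw [pyCollapse]
    split
    · rename_i hin
      rw [pvReplace_dd]
      have hdd : pvHasDD s = true := by rw [← pvIsIn_dd]; exact hin
      have hlt := pvRep2_length_lt s hdd
      rw [ih (pvRep2 s) (by omega)]
      exact pvCr_rep2 s
    · rename_i hin
      have hdd : pvHasDD s = false := by
        rw [← pvIsIn_dd]
        exact Bool.not_eq_true _ ▸ (by simpa using hin)
      exact (pvCr_no_dd s hdd).symm

theorem pvCollapse_eq_cr (s : List Char) : pyCollapse s = pvCr s :=
  pvCollapse_eq_cr_aux s.length s (le_refl _)

theorem pvAlnum_ne_underscore (c : Char) (h : PySem.Chars.isalnum c = true) : ¬ c = '_' := by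
  intro hc; subst hc
  exact absurd h (by decide)

theorem pvReplace_one (s : List Char) (a b : Char) :
    PySem.Chars.replace s [a] [b] = s.map (fun c => if c = a then b else c) := by
  have go : ∀ (fuel : Nat) (l acc : List Char), l.length ≤ fuel →
      PySem.Chars.replace.go [a] [b] fuel l acc
        = acc.reverse ++ l.map (fun c => if c = a then b else c) := by
    intro fuel
    induction fuel with
    | zero =>
      intro l acc h
      have : l = [] := by cases l <;> simp_all
      subst this
      simp [PySem.Chars.replace.go]
    | succ n ihf =>
      intro l acc h
      match l with
      | [] => simp [PySem.Chars.replace.go]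
      | c :: t =>
        by_cases hc : c = a
        · subst hc
          have hpre : List.isPrefixOf [c] (c :: t) = true := by
            simp [List.isPrefixOf]
          simp only [PySem.Chars.replace.go, hpre, if_pos]
          rw [show List.drop [c].length (c :: t) = t by simp,
            show [b].reverse ++ acc = b :: acc by simp]
          rw [ihf t (b :: acc) (by simp at h; omega)]
          simp
        · have hpre : List.isPrefixOf [a] (c :: t) = false := by
            simp [List.isPrefixOf]
            exact fun h' => hc h'.symm
          simp only [PySem.Chars.replace.go, hpre, Bool.false_eq_true, if_neg]
          rw [ihf t (c :: acc) (by simp at h; omega)]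
          simp [hc]
  have : PySem.Chars.replace s [a] [b] = PySem.Chars.replace.go [a] [b] s.length s [] := by
    simp [PySem.Chars.replace]
  rw [this, go s.length s [] (le_refl _)]
  simp

theorem pvSanitize (u : List Char) :
    (PySem.Chars.replace
        (PySem.Chars.replace (PySem.Chars.replace u ['/'] ['_']) ['\\'] ['_']) [' '] ['_']).map
      (fun ch => if PySem.Chars.isalnum ch || ch == '_' then ch else '_')
    = u.map pvG := by
  simp only [pvReplace_one, List.map_map]
  apply List.map_congr_left
  intro c _
  simp only [Function.comp]
  by_cases h1 : c = '/'
  · subst h1; simp [pvG]; decide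
  by_cases h2 : c = '\\'
  · subst h2; simp [h1, pvG]; decide
  by_cases h3 : c = ' '
  · subst h3; simp [h1, h2, pvG]; decide
  simp only [if_neg h1, if_neg h2, if_neg h3]
  by_cases h4 : PySem.Chars.isalnum c
  · simp [h4, pvG]
  · simp only [pvG, h4, Bool.false_or, if_neg (by simp [h4] : ¬(PySem.Chars.isalnum c = true))]
    by_cases h5 : c = '_' <;> simp [h5]

theorem pvDropWhile_map (t : List Char) :
    (t.map pvG).dropWhile (· = '_') = (t.dropWhile (fun c => !PySem.Chars.isalnum c)).map pvG := by
  induction t with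
  | nil => simp
  | cons d t' ih =>
    by_cases hd : PySem.Chars.isalnum d
    · have hne := pvAlnum_ne_underscore d hd
      simp [List.dropWhile, pvG, hd, hne]
    · simp [List.dropWhile, pvG, hd, ih]

theorem pvBPass (t : List Char) :
    bPass t false = pvCr (t.map pvG)
      ∧ bPass t true = pvCr ((t.dropWhile (fun c => !PySem.Chars.isalnum c)).map pvG) := by
  induction t with
  | nil => constructor <;> simp [bPass, pvCr]
  | cons c t' ih =>
    by_cases hc : PySem.Chars.isalnum c
    · have hne := pvAlnum_ne_underscore c hc
      have hmap : (c :: t').map pvG = c :: t'.map pvG := by simp [pvG, hc]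
      constructor
      · rw [hmap, pvCr_ne c _ hne]
        simp [bPass, hc, ih.1]
      · rw [show List.dropWhile (fun c => !PySem.Chars.isalnum c) (c :: t') = c :: t' by
          simp [List.dropWhile, hc]]
        rw [hmap, pvCr_ne c _ hne]
        simp [bPass, hc, ih.1]
    · have hmap : (c :: t').map pvG = '_' :: t'.map pvG := by simp [pvG, hc]
      constructor
      · rw [hmap, pvCr_us, pvDropWhile_map]
        simp [bPass, hc, ih.2]
      · rw [show List.dropWhile (fun c => !PySem.Chars.isalnum c) (c :: t')
            = List.dropWhile (fun c => !PySem.Chars.isalnum c) t' by simp [List.dropWhile, hc]]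
        simp [bPass, hc, ih.2]

-- ===== VERDICT (by name: the statement is the Claim_ definition above) =====
theorem slugify_table_name_py_spec : Claim_equal_slugify_table_name_py := by
  intro name _
  unfold Spec_slugify_table_name_py slugify_table_name_py slugify_table_name_py_alt
  dsimp only
  rw [pvSanitize, pvCollapse_eq_cr, ← (pvBPass (PySem.Chars.strip name.toList)).1]
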